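-- pv_equiv track=rewrite | github.com/blebon/directChillFoam | tutorials/heatTransfer/directChillFoam/Lebon2020/system/cylinder.py | write_boundary
-- ===== SOURCE A (Python) =====
-- def write_boundary(z_points=(-300.0, -57.0, -40.0, 0.0, 170.0)):
--     """Writes the boundary entry
--
--     :param z_points: z coordinates of the boundaries of the billet and mould sections.
--     :type z_points: tuple
--     :return: string containing the blockMeshDict boundary entry
--     :rtype: string
--
--     """
--     block = "boundary\n"
--     block += "(\n"
--     faces = ["water-film", "mould", "graphite", "hot-top"]
--     for i in range(len(z_points) - 1):
--         block += "    {:s}\n".format(faces[i])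
--         block += "    {\n"
--         block += "        type wall;\n"
--         block += "        faces\n"
--         block += "        (\n"
--         block += "            ({:2d} {:2d} {:2d} {:2d})\n".format(
--             4 + 8 * i, 7 + 8 * i, 15 + 8 * i, 12 + 8 * i
--         )
--         block += "            ({:2d} {:2d} {:2d} {:2d})\n".format(
--             5 + 8 * i, 4 + 8 * i, 12 + 8 * i, 13 + 8 * i
--         )
--         block += "            ({:2d} {:2d} {:2d} {:2d})\n".format(
--             6 + 8 * i, 5 + 8 * i, 13 + 8 * i, 14 + 8 * i
--         )
--         block += "            ({:2d} {:2d} {:2d} {:2d})\n".format(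
--             7 + 8 * i, 6 + 8 * i, 14 + 8 * i, 15 + 8 * i
--         )
--         block += "        );\n"
--         block += "    }\n"
--         block += "\n"
--
--     i = 0
--     block += "    ram\n"
--     block += "    {\n"
--     block += "        type patch;\n"
--     block += "        faces\n"
--     block += "        (\n"
--     block += "            ({:2d} {:2d} {:2d} {:2d})\n".format(
--         3 + 8 * i, 0 + 8 * i, 1 + 8 * i, 2 + 8 * i
--     )
--     block += "            ({:2d} {:2d} {:2d} {:2d})\n".format(
--         3 + 8 * i, 7 + 8 * i, 4 + 8 * i, 0 + 8 * i
--     )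
--     block += "            ({:2d} {:2d} {:2d} {:2d})\n".format(
--         2 + 8 * i, 6 + 8 * i, 7 + 8 * i, 3 + 8 * i
--     )
--     block += "            ({:2d} {:2d} {:2d} {:2d})\n".format(
--         1 + 8 * i, 5 + 8 * i, 6 + 8 * i, 2 + 8 * i
--     )
--     block += "            ({:2d} {:2d} {:2d} {:2d})\n".format(
--         0 + 8 * i, 4 + 8 * i, 5 + 8 * i, 1 + 8 * i
--     )
--     block += "        );\n"
--     block += "    }\n"
--     block += "\n"
--
--     i = len(z_points) - 1
--     block += "    free-surface\n"
--     block += "    {\n"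
--     block += "        type patch;\n"
--     block += "        faces\n"
--     block += "        (\n"
--     block += "            ({0:2d} {3:2d} {2:2d} {1:2d})\n".format(
--         3 + 8 * i, 2 + 8 * i, 1 + 8 * i, 0 + 8 * i
--     )
--     block += "            ({0:2d} {3:2d} {2:2d} {1:2d})\n".format(
--         3 + 8 * i, 0 + 8 * i, 4 + 8 * i, 7 + 8 * i
--     )
--     block += "            ({0:2d} {3:2d} {2:2d} {1:2d})\n".format(
--         2 + 8 * i, 3 + 8 * i, 7 + 8 * i, 6 + 8 * i
--     )
--     block += "            ({0:2d} {3:2d} {2:2d} {1:2d})\n".format(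
--         1 + 8 * i, 2 + 8 * i, 6 + 8 * i, 5 + 8 * i
--     )
--     block += "            ({0:2d} {3:2d} {2:2d} {1:2d})\n".format(
--         0 + 8 * i, 1 + 8 * i, 5 + 8 * i, 4 + 8 * i
--     )
--     block += "        );\n"
--     block += "    }\n"
--     block += ");"
--
--     return block
-- ===== SOURCE B (Python) =====
-- def write_boundary(z_points=(-300.0, -57.0, -40.0, 0.0, 170.0)):
--     n = len(z_points)
--     walls = ["water-film", "mould", "graphite", "hot-top"]
--     # one descriptor table: (name, type, faces); note free-surface's permuted
--     # format in the original prints exactly the ram quads shifted by 8*(n-1)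
--     ram = [(3, 0, 1, 2), (3, 7, 4, 0), (2, 6, 7, 3), (1, 5, 6, 2), (0, 4, 5, 1)]
--     patches = []
--     for i in range(n - 1):
--         b = 8 * i
--         patches.append((walls[i], "wall", [
--             (b + 4, b + 7, b + 15, b + 12),
--             (b + 5, b + 4, b + 12, b + 13),
--             (b + 6, b + 5, b + 13, b + 14),
--             (b + 7, b + 6, b + 14, b + 15),
--         ]))
--     patches.append(("ram", "patch", ram))
--     b = 8 * (n - 1)
--     patches.append(("free-surface", "patch",
--                     [tuple(b + v for v in f) for f in ram]))
--     lines = ["boundary", "("]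
--     for name, ptype, faces in patches:
--         lines.append("    " + name)
--         lines.append("    {")
--         lines.append("        type %s;" % ptype)
--         lines.append("        faces")
--         lines.append("        (")
--         for f in faces:
--             lines.append("            (%2d %2d %2d %2d)" % f)
--         lines.append("        );")
--         lines.append("    }")
--         lines.append("")
--     lines[-1] = ");"
--     return "\n".join(lines)
-- ===== Notes on version B (the rewrite author's own statement) =====
-- stated objective: simpler
-- what changed: B builds one table of patch descriptors (name, type, face quads) and renders it in a single formatting pass over a list of lines joined at the end, instead of A's three hand-unrolled string-concatenation blocks; the free-surface quads are the ram quads shifted by 8*(n-1), which B states directly instead of A's permuted format fields.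
import Mathlib
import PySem

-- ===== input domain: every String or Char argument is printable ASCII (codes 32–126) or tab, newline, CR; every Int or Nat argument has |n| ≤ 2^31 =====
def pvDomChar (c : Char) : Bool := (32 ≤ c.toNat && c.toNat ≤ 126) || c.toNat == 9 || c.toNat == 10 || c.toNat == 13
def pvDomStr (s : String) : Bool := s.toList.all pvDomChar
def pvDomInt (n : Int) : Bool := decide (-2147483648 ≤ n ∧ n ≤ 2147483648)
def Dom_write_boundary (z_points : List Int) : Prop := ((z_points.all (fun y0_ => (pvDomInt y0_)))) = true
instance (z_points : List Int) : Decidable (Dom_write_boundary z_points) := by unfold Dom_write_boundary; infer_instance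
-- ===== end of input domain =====

-- B replaces A's three hand-unrolled '+='-concatenation blocks with one patch-descriptor
-- table rendered by a single formatting pass (objective: simpler); return value only.

-- ===== PORT A =====
-- "{:2d}".format(n): str(n) right-aligned to width 2
def pvFmt2 (n : Int) : String := if (PySem.Int.toStr n).length < 2 then " " ++ PySem.Int.toStr n else PySem.Int.toStr n

-- '            ({:2d} {:2d} {:2d} {:2d})\n'.format(a,b,c,d)
def pvFaceA (a b c d : Int) : String :=
  "            (" ++ pvFmt2 a ++ " " ++ pvFmt2 b ++ " " ++ pvFmt2 c ++ " " ++ pvFmt2 d ++ ")\n"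

-- '            ({0:2d} {3:2d} {2:2d} {1:2d})\n'.format(a,b,c,d): prints a d c b
def pvFaceAperm (a b c d : Int) : String :=
  "            (" ++ pvFmt2 a ++ " " ++ pvFmt2 d ++ " " ++ pvFmt2 c ++ " " ++ pvFmt2 b ++ ")\n"

def write_boundary (z_points : List Int) : String :=
  let faces : List String := ["water-film", "mould", "graphite", "hot-top"]
  let block := "boundary\n" ++ "(\n"
  let block := (PySem.List.pyRange 0 ((z_points.length : Int) - 1) 1).foldl (fun block i =>
    block ++ "    " ++ ((PySem.List.pyGet? faces i).getD "")  -- faces[i]; in range under Pre_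
      ++ "\n" ++ "    {\n" ++ "        type wall;\n" ++ "        faces\n" ++ "        (\n"
      ++ pvFaceA (4 + 8*i) (7 + 8*i) (15 + 8*i) (12 + 8*i)
      ++ pvFaceA (5 + 8*i) (4 + 8*i) (12 + 8*i) (13 + 8*i)
      ++ pvFaceA (6 + 8*i) (5 + 8*i) (13 + 8*i) (14 + 8*i)
      ++ pvFaceA (7 + 8*i) (6 + 8*i) (14 + 8*i) (15 + 8*i)
      ++ "        );\n" ++ "    }\n" ++ "\n") block
  let i : Int := 0
  let block := block ++ "    ram\n" ++ "    {\n" ++ "        type patch;\n"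
      ++ "        faces\n" ++ "        (\n"
      ++ pvFaceA (3 + 8*i) (0 + 8*i) (1 + 8*i) (2 + 8*i)
      ++ pvFaceA (3 + 8*i) (7 + 8*i) (4 + 8*i) (0 + 8*i)
      ++ pvFaceA (2 + 8*i) (6 + 8*i) (7 + 8*i) (3 + 8*i)
      ++ pvFaceA (1 + 8*i) (5 + 8*i) (6 + 8*i) (2 + 8*i)
      ++ pvFaceA (0 + 8*i) (4 + 8*i) (5 + 8*i) (1 + 8*i)
      ++ "        );\n" ++ "    }\n" ++ "\n"
  let i : Int := (z_points.length : Int) - 1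
  let block := block ++ "    free-surface\n" ++ "    {\n" ++ "        type patch;\n"
      ++ "        faces\n" ++ "        (\n"
      ++ pvFaceAperm (3 + 8*i) (2 + 8*i) (1 + 8*i) (0 + 8*i)
      ++ pvFaceAperm (3 + 8*i) (0 + 8*i) (4 + 8*i) (7 + 8*i)
      ++ pvFaceAperm (2 + 8*i) (3 + 8*i) (7 + 8*i) (6 + 8*i)
      ++ pvFaceAperm (1 + 8*i) (2 + 8*i) (6 + 8*i) (5 + 8*i)
      ++ pvFaceAperm (0 + 8*i) (1 + 8*i) (5 + 8*i) (4 + 8*i)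
      ++ "        );\n" ++ "    }\n" ++ ");"
  block

-- ===== PORT B =====
-- '(%2d %2d %2d %2d)' line for one quad (same %2d rule as pvFmt2)
def pvFaceLine (f : Int × Int × Int × Int) : String :=
  "            (" ++ pvFmt2 f.1 ++ " " ++ pvFmt2 f.2.1 ++ " " ++ pvFmt2 f.2.2.1 ++ " " ++ pvFmt2 f.2.2.2 ++ ")"

def pvRam : List (Int × Int × Int × Int) :=
  [(3, 0, 1, 2), (3, 7, 4, 0), (2, 6, 7, 3), (1, 5, 6, 2), (0, 4, 5, 1)]

-- the lines appended for one descriptor (name, type, quads)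
def pvPatchLines (p : String × String × List (Int × Int × Int × Int)) : List String :=
  ["    " ++ p.1, "    {", "        type " ++ p.2.1 ++ ";", "        faces", "        ("]
    ++ p.2.2.map pvFaceLine ++ ["        );", "    }", ""]

def write_boundary_alt (z_points : List Int) : String :=
  let n : Int := z_points.length
  let walls : List String := ["water-film", "mould", "graphite", "hot-top"]
  let wallPatches := (PySem.List.pyRange 0 (n - 1) 1).map (fun i =>
    let b := 8 * i
    (((PySem.List.pyGet? walls i).getD ""),  -- walls[i]; in range under Pre_
      "wall",
      [(b+4, b+7, b+15, b+12), (b+5, b+4, b+12, b+13),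
       (b+6, b+5, b+13, b+14), (b+7, b+6, b+14, b+15)]))
  let b := 8 * (n - 1)
  let patches := wallPatches
    ++ [("ram", "patch", pvRam),
        ("free-surface", "patch", pvRam.map (fun f => (b + f.1, b + f.2.1, b + f.2.2.1, b + f.2.2.2)))]
  let lines := ["boundary", "("] ++ patches.flatMap pvPatchLines
  let lines := lines.dropLast ++ [");"]   -- lines[-1] = ");"
  PySem.Str.join "\n" lines

-- ===== PRECONDITION & SPEC =====
-- Pre_ excludes exactly the inputs with more than 5 points, on which A raises
-- IndexError at faces[i] (and B raises the same way at walls[i]).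
def Pre_write_boundary (z_points : List Int) : Prop := z_points.length ≤ 5
instance (z_points : List Int) : Decidable (Pre_write_boundary z_points) := by unfold Pre_write_boundary; infer_instance
def pvWitness_write_boundary : List Int := [-300, -57, -40, 0, 170]
def Spec_write_boundary (z_points : List Int) (out : String) : Prop := out = write_boundary_alt z_points
instance (z_points : List Int) (out : String) : Decidable (Spec_write_boundary z_points out) := by unfold Spec_write_boundary; infer_instance

-- ===== CLAIM (what is proved, stated in full; the proofs are below) =====
def Claim_equal_write_boundary : Prop := ∀ (z_points : List Int), Dom_write_boundary z_points → Pre_write_boundary z_points → Spec_write_boundary z_points (write_boundary z_points)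

-- ===== LEMMAS AND PROOFS =====
-- both ports read z_points only through its length
theorem write_boundary_congr_len (z w : List Int) (h : z.length = w.length) :
    write_boundary z = write_boundary w := by
  simp only [write_boundary, h]

theorem write_boundary_alt_congr_len (z w : List Int) (h : z.length = w.length) :
    write_boundary_alt z = write_boundary_alt w := by
  simp only [write_boundary_alt, h]

-- ===== VERDICT (by name: the statement is the Claim_ definition above) =====
set_option maxRecDepth 100000 in
set_option maxHeartbeats 4000000 in
theorem write_boundary_spec : Claim_equal_write_boundary := by
  intro z _ hpre
  unfold Spec_write_boundary
  rw [write_boundary_congr_len z (List.replicate z.length 0) (by simp),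
      write_boundary_alt_congr_len z (List.replicate z.length 0) (by simp)]
  have h5 : z.length ≤ 5 := hpre
  generalize z.length = n at h5 ⊢
  interval_cases n <;> decide
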